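-- pv_equiv track=rewrite | github.com/leogoncalves/IA | hill-climbing/n-queens.py | first_neighbour
-- ===== SOURCE A (Python) =====
-- import copy
--
-- board_size = 4
--
-- def heuristica(board):
--     h = 0
--     for queen1 in range(board_size):
--         for queen2 in range(queen1 + 1, board_size):
--             if(board[queen1] == board[queen2]):
--                 h += 1
--             elif(abs(queen1 - queen2) == abs(board[queen1] - board[queen2])):
--                 h += 1
--     return h
--
-- def first_neighbour(board):
--     neighbour = copy.deepcopy(board)
--     h_atual = heuristica(board)  # heurística do quadro atual
--     for i in range(board_size):  # iteração por todas as linhas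
--         for j in range(board_size):  # iteração por todas as colunas
--             if (j != board[i]):  # Se não for a posição de uma rainha
--                 mock_board = [j if a == i else board[a]
--                               for a in range(board_size)]
--                 h = heuristica(mock_board)  # Verifica a heurística do vizinho
--                 if h < h_atual:  # se for uma nova menor heurística possível
--                     neighbour[i] = j
--                     break
--     return neighbour
-- ===== SOURCE B (Python) =====
-- board_size = 4
--
-- def conflicts(board, row, col):
--     c = 0
--     for k in range(board_size):
--         if k != row and (board[k] == col or abs(row - k) == abs(col - board[k])):
--             c += 1
--     return c
--
-- def first_neighbour(board):
--     neighbour = list(board)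
--     for i in range(board_size):
--         base = conflicts(board, i, board[i])
--         j = next((j for j in range(board_size)
--                   if j != board[i] and conflicts(board, i, j) < base), None)
--         if j is not None:
--             neighbour[i] = j
--     return neighbour
-- ===== Notes on version B (the rewrite author's own statement) =====
-- stated objective: alternative
-- what changed: Instead of rebuilding a mock board and recomputing the full pairwise heuristic for every candidate move, B counts only the conflicts involving the moved queen and compares conflicts(i,j) with conflicts(i,board[i]), an equivalent improvement test that does asymptotically less work per move in the board-size constant (here fixed at 4, so overall cost is bounded either way).
import Mathlib
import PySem

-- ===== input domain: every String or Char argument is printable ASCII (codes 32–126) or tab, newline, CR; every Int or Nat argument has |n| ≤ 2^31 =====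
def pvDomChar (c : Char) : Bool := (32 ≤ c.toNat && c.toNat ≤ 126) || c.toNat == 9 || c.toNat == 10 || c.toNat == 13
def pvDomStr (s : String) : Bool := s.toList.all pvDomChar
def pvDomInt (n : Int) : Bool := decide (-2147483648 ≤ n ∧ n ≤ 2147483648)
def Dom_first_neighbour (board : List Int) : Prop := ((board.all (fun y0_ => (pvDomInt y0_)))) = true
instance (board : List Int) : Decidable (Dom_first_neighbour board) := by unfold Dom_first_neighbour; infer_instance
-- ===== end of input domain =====

-- B replaces A's "rebuild the board and recompute the whole pairwise heuristic for every
-- candidate move" by counting only the conflicts involving the moved queen (a move changes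
-- nothing else), comparing conflicts(i, j) against conflicts(i, board[i]).

-- ===== PORT A =====
def pvGetA (board : List Int) (i : Int) : Int := PySem.List.pyGetD board i 0  -- board[i], exact under Pre_

def heuristica (board : List Int) : Int :=
  (PySem.List.pyRange 0 4 1).foldl (fun h q1 =>
    (PySem.List.pyRange (q1 + 1) 4 1).foldl (fun h q2 =>
      if pvGetA board q1 = pvGetA board q2 then h + 1
      else if (q1 - q2).natAbs = (pvGetA board q1 - pvGetA board q2).natAbs then h + 1
      else h) h) 0

-- the inner `for j … if … break` loop of A: first j whose mock board improves on h_atual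
def innerA (board : List Int) (h_atual : Int) (i : Int) : List Int → Option Int
  | [] => none
  | j :: js =>
    if j ≠ pvGetA board i then
      if heuristica ((PySem.List.pyRange 0 4 1).map
          (fun a => if a = i then j else pvGetA board a)) < h_atual then some j
      else innerA board h_atual i js
    else innerA board h_atual i js

def first_neighbour (board : List Int) : List Int :=
  let h_atual := heuristica board
  (PySem.List.pyRange 0 4 1).foldl (fun neighbour i =>
    match innerA board h_atual i (PySem.List.pyRange 0 4 1) with
    | some j => neighbour.set i.toNat j      -- neighbour[i] = j  (0 ≤ i < 4 ≤ len)
    | none => neighbour) board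

-- ===== PORT B =====
def pvGetB (board : List Int) (i : Int) : Int := PySem.List.pyGetD board i 0  -- board[i], exact under Pre_

def conflicts (board : List Int) (row col : Int) : Int :=
  (PySem.List.pyRange 0 4 1).foldl (fun c k =>
    if k ≠ row ∧ (pvGetB board k = col ∨ (row - k).natAbs = (col - pvGetB board k).natAbs)
    then c + 1 else c) 0

def first_neighbour_alt (board : List Int) : List Int :=
  (PySem.List.pyRange 0 4 1).foldl (fun neighbour i =>
    let bi := pvGetB board i
    let base := conflicts board i bi
    match (PySem.List.pyRange 0 4 1).find?
        (fun j => decide (j ≠ bi) && decide (conflicts board i j < base)) with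
    | some j => neighbour.set i.toNat j
    | none => neighbour) board

-- ===== PRECONDITION & SPEC =====
-- A indexes board[0..3] (board_size = 4); on shorter boards it raises IndexError.
def Pre_first_neighbour (board : List Int) : Prop := 4 ≤ board.length
instance (board : List Int) : Decidable (Pre_first_neighbour board) := by
  unfold Pre_first_neighbour; infer_instance
def pvWitness_first_neighbour : List Int := [0, 1, 2, 3]

def Spec_first_neighbour (board : List Int) (out : List Int) : Prop := out = first_neighbour_alt board
instance (board : List Int) (out : List Int) : Decidable (Spec_first_neighbour board out) := by unfold Spec_first_neighbour; infer_instance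

-- ===== CLAIM (what is proved, stated in full; the proofs are below) =====
def Claim_equal_first_neighbour : Prop := ∀ (board : List Int), Dom_first_neighbour board → Pre_first_neighbour board → Spec_first_neighbour board (first_neighbour board)

-- ===== LEMMAS AND PROOFS =====

-- 0/1 indicator of a conflict between squares at row distance d, in A's orientation (D)
-- and in B's orientation (E); D/E relate by symmetry of = and of |a - b|.
def Dind (d : Nat) (a b : Int) : Int := if a = b ∨ d = (a - b).natAbs then 1 else 0
def Eind (d : Nat) (c a : Int) : Int := if a = c ∨ d = (c - a).natAbs then 1 else 0

theorem TS (d : Nat) (a b x : Int) :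
    (if a = b then x + 1 else if d = (a - b).natAbs then x + 1 else x) = x + Dind d a b := by
  by_cases h1 : a = b <;> by_cases h2 : d = (a - b).natAbs <;> simp [Dind, h1, h2]

theorem CS (P : Prop) [Decidable P] (x : Int) :
    (if P then x + 1 else x) = x + (if P then 1 else 0) := by
  by_cases h : P <;> simp [h]

theorem nsc (a b : Int) : (a - b).natAbs = (b - a).natAbs := by omega

theorem DE1 (d : Nat) (a b : Int) : Dind d a b = Eind d b a := by
  simp only [Dind, Eind, nsc a b]
theorem DE2 (d : Nat) (a b : Int) : Dind d a b = Eind d a b := by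
  simp only [Dind, Eind, eq_comm]

theorem gA0 (b0 b1 b2 b3 : Int) (r : List Int) : pvGetA (b0::b1::b2::b3::r) 0 = b0 := by
  simp [pvGetA, pysem]
theorem gA1 (b0 b1 b2 b3 : Int) (r : List Int) : pvGetA (b0::b1::b2::b3::r) 1 = b1 := by
  simp [pvGetA, pysem]
theorem gA2 (b0 b1 b2 b3 : Int) (r : List Int) : pvGetA (b0::b1::b2::b3::r) 2 = b2 := by
  simp [pvGetA, pysem]
theorem gA3 (b0 b1 b2 b3 : Int) (r : List Int) : pvGetA (b0::b1::b2::b3::r) 3 = b3 := by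
  simp [pvGetA, pysem]
theorem gB (b : List Int) (i : Int) : pvGetB b i = pvGetA b i := rfl

theorem hfour (c0 c1 c2 c3 : Int) (r : List Int) :
    heuristica (c0::c1::c2::c3::r) =
      Dind 1 c0 c1 + Dind 2 c0 c2 + Dind 3 c0 c3 + Dind 1 c1 c2 + Dind 2 c1 c3 + Dind 1 c2 c3 := by
  simp only [heuristica,
    show PySem.List.pyRange 0 4 1 = [0,1,2,3] from by decide,
    show PySem.List.pyRange 1 4 1 = [1,2,3] from by decide,
    show PySem.List.pyRange 2 4 1 = [2,3] from by decide,
    show PySem.List.pyRange 3 4 1 = [3] from by decide,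
    show PySem.List.pyRange 4 4 1 = ([] : List Int) from by decide,
    show PySem.List.pyRange (0+1) 4 1 = [1,2,3] from by decide,
    show PySem.List.pyRange (1+1) 4 1 = [2,3] from by decide,
    show PySem.List.pyRange (2+1) 4 1 = [3] from by decide,
    show PySem.List.pyRange (3+1) 4 1 = ([] : List Int) from by decide,
    List.foldl, gA0, gA1, gA2, gA3,
    show ((0:Int) - 1).natAbs = 1 from by decide,
    show ((0:Int) - 2).natAbs = 2 from by decide,
    show ((0:Int) - 3).natAbs = 3 from by decide,
    show ((1:Int) - 2).natAbs = 1 from by decide,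
    show ((1:Int) - 3).natAbs = 2 from by decide,
    show ((2:Int) - 3).natAbs = 1 from by decide,
    TS, zero_add]

theorem conf0 (b0 b1 b2 b3 col : Int) (r : List Int) :
    conflicts (b0::b1::b2::b3::r) 0 col = Eind 1 col b1 + Eind 2 col b2 + Eind 3 col b3 := by
  simp only [conflicts,
    show PySem.List.pyRange 0 4 1 = [0,1,2,3] from by decide,
    List.foldl, gB, gA0, gA1, gA2, gA3,
    show (((0:Int)) ≠ 0) = False from by decide,
    show (((1:Int)) ≠ 0) = True from by decide,
    show (((2:Int)) ≠ 0) = True from by decide,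
    show (((3:Int)) ≠ 0) = True from by decide,
    true_and, false_and, if_false,
    show ((0:Int) - 1).natAbs = 1 from by decide,
    show ((0:Int) - 2).natAbs = 2 from by decide,
    show ((0:Int) - 3).natAbs = 3 from by decide,
    CS, zero_add, add_zero]
  simp only [Eind]

theorem conf1 (b0 b1 b2 b3 col : Int) (r : List Int) :
    conflicts (b0::b1::b2::b3::r) 1 col = Eind 1 col b0 + Eind 1 col b2 + Eind 2 col b3 := by
  simp only [conflicts,
    show PySem.List.pyRange 0 4 1 = [0,1,2,3] from by decide,
    List.foldl, gB, gA0, gA1, gA2, gA3,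
    show (((0:Int)) ≠ 1) = True from by decide,
    show (((1:Int)) ≠ 1) = False from by decide,
    show (((2:Int)) ≠ 1) = True from by decide,
    show (((3:Int)) ≠ 1) = True from by decide,
    true_and, false_and, if_false,
    show ((1:Int) - 0).natAbs = 1 from by decide,
    show ((1:Int) - 2).natAbs = 1 from by decide,
    show ((1:Int) - 3).natAbs = 2 from by decide,
    CS, zero_add, add_zero]
  simp only [Eind]

theorem conf2 (b0 b1 b2 b3 col : Int) (r : List Int) :
    conflicts (b0::b1::b2::b3::r) 2 col = Eind 2 col b0 + Eind 1 col b1 + Eind 1 col b3 := by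
  simp only [conflicts,
    show PySem.List.pyRange 0 4 1 = [0,1,2,3] from by decide,
    List.foldl, gB, gA0, gA1, gA2, gA3,
    show (((0:Int)) ≠ 2) = True from by decide,
    show (((1:Int)) ≠ 2) = True from by decide,
    show (((2:Int)) ≠ 2) = False from by decide,
    show (((3:Int)) ≠ 2) = True from by decide,
    true_and, false_and, if_false,
    show ((2:Int) - 0).natAbs = 2 from by decide,
    show ((2:Int) - 1).natAbs = 1 from by decide,
    show ((2:Int) - 3).natAbs = 1 from by decide,
    CS, zero_add, add_zero]
  simp only [Eind]

theorem conf3 (b0 b1 b2 b3 col : Int) (r : List Int) :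
    conflicts (b0::b1::b2::b3::r) 3 col = Eind 3 col b0 + Eind 2 col b1 + Eind 1 col b2 := by
  simp only [conflicts,
    show PySem.List.pyRange 0 4 1 = [0,1,2,3] from by decide,
    List.foldl, gB, gA0, gA1, gA2, gA3,
    show (((0:Int)) ≠ 3) = True from by decide,
    show (((1:Int)) ≠ 3) = True from by decide,
    show (((2:Int)) ≠ 3) = True from by decide,
    show (((3:Int)) ≠ 3) = False from by decide,
    true_and, false_and, if_false,
    show ((3:Int) - 0).natAbs = 3 from by decide,
    show ((3:Int) - 1).natAbs = 2 from by decide,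
    show ((3:Int) - 2).natAbs = 1 from by decide,
    CS, zero_add, add_zero]
  simp only [Eind]

-- the improving-move test of A equals the conflict-delta test of B, per row

theorem key0 (b0 b1 b2 b3 j : Int) (r : List Int) :
    (heuristica ((PySem.List.pyRange 0 4 1).map
        (fun a => if a = (0:Int) then j else pvGetA (b0::b1::b2::b3::r) a)) <
      heuristica (b0::b1::b2::b3::r)) ↔
    (conflicts (b0::b1::b2::b3::r) 0 j <
      conflicts (b0::b1::b2::b3::r) 0 (pvGetB (b0::b1::b2::b3::r) 0)) := by
  rw [show (PySem.List.pyRange 0 4 1).map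
        (fun a => if a = (0:Int) then j else pvGetA (b0::b1::b2::b3::r) a) = [j, b1, b2, b3] by
    norm_num [show PySem.List.pyRange 0 4 1 = [0,1,2,3] from by decide, gA1, gA2, gA3]]
  rw [gB, gA0, show ([j, b1, b2, b3] : List Int) = j::b1::b2::b3::([]:List Int) from rfl,
     hfour, hfour, conf0, conf0,
     DE2 1 j b1, DE2 2 j b2, DE2 3 j b3, DE2 1 b0 b1, DE2 2 b0 b2, DE2 3 b0 b3]
  generalize Eind 1 j b1 = x1; generalize Eind 2 j b2 = x2; generalize Eind 3 j b3 = x3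
  generalize Eind 1 b0 b1 = y1; generalize Eind 2 b0 b2 = y2; generalize Eind 3 b0 b3 = y3
  generalize Dind 1 b1 b2 = p1; generalize Dind 2 b1 b3 = p2; generalize Dind 1 b2 b3 = p3
  omega

theorem key1 (b0 b1 b2 b3 j : Int) (r : List Int) :
    (heuristica ((PySem.List.pyRange 0 4 1).map
        (fun a => if a = (1:Int) then j else pvGetA (b0::b1::b2::b3::r) a)) <
      heuristica (b0::b1::b2::b3::r)) ↔
    (conflicts (b0::b1::b2::b3::r) 1 j <
      conflicts (b0::b1::b2::b3::r) 1 (pvGetB (b0::b1::b2::b3::r) 1)) := by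
  rw [show (PySem.List.pyRange 0 4 1).map
        (fun a => if a = (1:Int) then j else pvGetA (b0::b1::b2::b3::r) a) = [b0, j, b2, b3] by
    norm_num [show PySem.List.pyRange 0 4 1 = [0,1,2,3] from by decide, gA0, gA2, gA3]]
  rw [gB, gA1, show ([b0, j, b2, b3] : List Int) = b0::j::b2::b3::([]:List Int) from rfl,
     hfour, hfour, conf1, conf1,
     DE1 1 b0 j, DE2 1 j b2, DE2 2 j b3, DE1 1 b0 b1, DE2 1 b1 b2, DE2 2 b1 b3]
  generalize Eind 1 j b0 = x1; generalize Eind 1 j b2 = x2; generalize Eind 2 j b3 = x3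
  generalize Eind 1 b1 b0 = y1; generalize Eind 1 b1 b2 = y2; generalize Eind 2 b1 b3 = y3
  generalize Dind 2 b0 b2 = p1; generalize Dind 3 b0 b3 = p2; generalize Dind 1 b2 b3 = p3
  omega

theorem key2 (b0 b1 b2 b3 j : Int) (r : List Int) :
    (heuristica ((PySem.List.pyRange 0 4 1).map
        (fun a => if a = (2:Int) then j else pvGetA (b0::b1::b2::b3::r) a)) <
      heuristica (b0::b1::b2::b3::r)) ↔
    (conflicts (b0::b1::b2::b3::r) 2 j <
      conflicts (b0::b1::b2::b3::r) 2 (pvGetB (b0::b1::b2::b3::r) 2)) := by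
  rw [show (PySem.List.pyRange 0 4 1).map
        (fun a => if a = (2:Int) then j else pvGetA (b0::b1::b2::b3::r) a) = [b0, b1, j, b3] by
    norm_num [show PySem.List.pyRange 0 4 1 = [0,1,2,3] from by decide, gA0, gA1, gA3]]
  rw [gB, gA2, show ([b0, b1, j, b3] : List Int) = b0::b1::j::b3::([]:List Int) from rfl,
     hfour, hfour, conf2, conf2,
     DE1 2 b0 j, DE1 1 b1 j, DE2 1 j b3, DE1 2 b0 b2, DE1 1 b1 b2, DE2 1 b2 b3]
  generalize Eind 2 j b0 = x1; generalize Eind 1 j b1 = x2; generalize Eind 1 j b3 = x3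
  generalize Eind 2 b2 b0 = y1; generalize Eind 1 b2 b1 = y2; generalize Eind 1 b2 b3 = y3
  generalize Dind 1 b0 b1 = p1; generalize Dind 3 b0 b3 = p2; generalize Dind 2 b1 b3 = p3
  omega

theorem key3 (b0 b1 b2 b3 j : Int) (r : List Int) :
    (heuristica ((PySem.List.pyRange 0 4 1).map
        (fun a => if a = (3:Int) then j else pvGetA (b0::b1::b2::b3::r) a)) <
      heuristica (b0::b1::b2::b3::r)) ↔
    (conflicts (b0::b1::b2::b3::r) 3 j <
      conflicts (b0::b1::b2::b3::r) 3 (pvGetB (b0::b1::b2::b3::r) 3)) := by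
  rw [show (PySem.List.pyRange 0 4 1).map
        (fun a => if a = (3:Int) then j else pvGetA (b0::b1::b2::b3::r) a) = [b0, b1, b2, j] by
    norm_num [show PySem.List.pyRange 0 4 1 = [0,1,2,3] from by decide, gA0, gA1, gA2]]
  rw [gB, gA3, show ([b0, b1, b2, j] : List Int) = b0::b1::b2::j::([]:List Int) from rfl,
     hfour, hfour, conf3, conf3,
     DE1 3 b0 j, DE1 2 b1 j, DE1 1 b2 j, DE1 3 b0 b3, DE1 2 b1 b3, DE1 1 b2 b3]
  generalize Eind 3 j b0 = x1; generalize Eind 2 j b1 = x2; generalize Eind 1 j b2 = x3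
  generalize Eind 3 b3 b0 = y1; generalize Eind 2 b3 b1 = y2; generalize Eind 1 b3 b2 = y3
  generalize Dind 1 b0 b1 = p1; generalize Dind 2 b0 b2 = p2; generalize Dind 1 b1 b2 = p3
  omega

-- A's break-loop equals B's find?, given the per-candidate condition equivalence
theorem innerA_eq_find (B : List Int) (h base : Int) (i : Int)
    (hiff : ∀ j : Int, (heuristica ((PySem.List.pyRange 0 4 1).map
        (fun a => if a = i then j else pvGetA B a)) < h) ↔ conflicts B i j < base) :
    ∀ js : List Int, innerA B h i js =
      js.find? (fun j => decide (j ≠ pvGetB B i) && decide (conflicts B i j < base))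
  | [] => rfl
  | j :: js => by
    have hga : pvGetB B i = pvGetA B i := rfl
    by_cases hj : j = pvGetA B i
    · simp [innerA, List.find?, hj, hga, innerA_eq_find B h base i hiff js]
    · by_cases hc : conflicts B i j < base
      · simp [innerA, List.find?, hj, hga, hc, (hiff j).2 hc]
      · have hh : ¬ (heuristica ((PySem.List.pyRange 0 4 1).map
            (fun a => if a = i then j else pvGetA B a)) < h) := fun hh => hc ((hiff j).1 hh)
        simp [innerA, List.find?, hj, hga, hc, hh, innerA_eq_find B h base i hiff js]

-- ===== VERDICT (by name: the statement is the Claim_ definition above) =====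
theorem first_neighbour_spec : Claim_equal_first_neighbour := by
  intro board _ hpre
  unfold Spec_first_neighbour
  obtain ⟨b0, b1, b2, b3, r, rfl⟩ :
      ∃ x0 x1 x2 x3 t, board = x0 :: x1 :: x2 :: x3 :: t := by
    match board, hpre with
    | x0 :: x1 :: x2 :: x3 :: t, _ => exact ⟨x0, x1, x2, x3, t, rfl⟩
  simp only [first_neighbour, first_neighbour_alt,
    show PySem.List.pyRange 0 4 1 = [0,1,2,3] from by decide, List.foldl]
  rw [innerA_eq_find _ _ _ _ (fun j => key0 b0 b1 b2 b3 j r),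
      innerA_eq_find _ _ _ _ (fun j => key1 b0 b1 b2 b3 j r),
      innerA_eq_find _ _ _ _ (fun j => key2 b0 b1 b2 b3 j r),
      innerA_eq_find _ _ _ _ (fun j => key3 b0 b1 b2 b3 j r)]
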